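-- pv_equiv track=rewrite | github.com/rabinkmc/dsa | python/shortest_distance_to_target_string.py | closestTarget
-- ===== SOURCE A (Python) =====
-- from typing import List
-- from collections import defaultdict
--
-- def closestTarget(words: List[str], target: str, startIndex: int) -> int:
--     words_map = defaultdict(list)
--     for idx, word in enumerate(words):
--         words_map[word].append(idx)
--     if target not in words_map:
--         return -1
--     positions = words_map[target]
--     ans = len(words)
--     for pos in positions:
--         cdist = abs(startIndex - pos)
--         ans = min(ans, cdist, len(words) - cdist)
--     return ans
-- ===== SOURCE B (Python) =====
-- def closestTarget(words, target, startIndex):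
--     n = len(words)
--     found = False
--     ans = n
--     for i, w in enumerate(words):
--         if w == target:
--             found = True
--             cdist = abs(startIndex - i)
--             ans = min(ans, cdist, n - cdist)
--     return ans if found else -1
-- ===== Notes on version B (the rewrite author's own statement) =====
-- stated objective: simpler
-- what changed: Replaces the two-phase defaultdict index (group all indices by word, then scan target's position list) with a single pass over enumerate(words) keeping a running minimum and a found flag.
import Mathlib
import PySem

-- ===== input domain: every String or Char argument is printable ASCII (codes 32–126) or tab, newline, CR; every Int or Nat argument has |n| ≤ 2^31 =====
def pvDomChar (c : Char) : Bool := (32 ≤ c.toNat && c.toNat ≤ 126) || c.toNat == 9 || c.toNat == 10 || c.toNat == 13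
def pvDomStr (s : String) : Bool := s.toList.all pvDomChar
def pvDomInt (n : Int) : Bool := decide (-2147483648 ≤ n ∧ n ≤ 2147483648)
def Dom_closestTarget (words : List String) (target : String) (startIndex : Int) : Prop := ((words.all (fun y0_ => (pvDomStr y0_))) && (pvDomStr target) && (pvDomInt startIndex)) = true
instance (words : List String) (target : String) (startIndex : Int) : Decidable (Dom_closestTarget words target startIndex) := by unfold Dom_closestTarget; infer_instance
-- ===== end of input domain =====

-- B replaces A's two-phase defaultdict index with a single running-minimum pass; objective: simpler.

-- ===== PORT A =====
def closestTarget (words : List String) (target : String) (startIndex : Int) : Int :=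
  let wordsMap : PySem.Dict String (List Int) :=
    (PySem.List.enumerate words 0).foldl
      (fun d p => d.modify p.2 [] (· ++ [p.1])) PySem.Dict.empty
  if wordsMap.contains target = false then -1
  else
    let positions := wordsMap.getD target []
    let ans : Int := PySem.List.len words
    positions.foldl
      (fun ans pos =>
        let cdist := |startIndex - pos|
        min (min ans cdist) (PySem.List.len words - cdist)) ans

-- ===== PORT B =====
def closestTarget_alt (words : List String) (target : String) (startIndex : Int) : Int :=
  let n : Int := PySem.List.len words
  let res :=
    (PySem.List.enumerate words 0).foldl
      (fun s p =>
        if p.2 == target then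
          let cdist := |startIndex - p.1|
          (true, min (min s.2 cdist) (n - cdist))
        else s)
      (false, n)
  if res.1 then res.2 else -1

-- ===== PRECONDITION & SPEC =====
def Spec_closestTarget (words : List String) (target : String) (startIndex : Int) (out : Int) : Prop := out = closestTarget_alt words target startIndex
instance (words : List String) (target : String) (startIndex : Int) (out : Int) : Decidable (Spec_closestTarget words target startIndex out) := by unfold Spec_closestTarget; infer_instance

-- ===== CLAIM (what is proved, stated in full; the proofs are below) =====
def Claim_equal_closestTarget : Prop := ∀ (words : List String) (target : String) (startIndex : Int), Dom_closestTarget words target startIndex → Spec_closestTarget words target startIndex (closestTarget words target startIndex)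

-- ===== LEMMAS AND PROOFS =====

-- a fold that sets the flag and updates the running value splits into flag and value
theorem pair_fold {A : Type} (l : List A) (f : Int → A → Int) (b : Bool) (a : Int) :
    l.foldl (fun s x => (true, f s.2 x)) (b, a) = (b || !l.isEmpty, l.foldl f a) := by
  induction l generalizing b a with
  | nil => simp
  | cons x t ih => simp [ih]

-- A's grouped position list for `target` is the filtered index list.
theorem positions_eq (words : List String) (target : String) :
    (((PySem.List.enumerate words 0).foldl
        (fun d p => d.modify p.2 [] (· ++ [p.1]))
        (PySem.Dict.empty : PySem.Dict String (List Int))).getD target [])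
      = (((PySem.List.enumerate words 0).filter (fun p => p.2 == target)).map (·.1)) := by
  have h : (PySem.List.enumerate words 0).foldl
        (fun d p => d.modify p.2 [] (· ++ [p.1]))
        (PySem.Dict.empty : PySem.Dict String (List Int))
      = ((PySem.List.enumerate words 0).map (fun p => (p.2, p.1))).foldl
        (fun d q => d.modify q.1 [] (· ++ [q.2])) PySem.Dict.empty := by
    rw [List.foldl_map]
  rw [h, PySem.Dict.getD_foldl_modify_append]
  simp [List.filter_map, Function.comp_def, List.map_map]

theorem mem_iff_exists_gen (words : List String) (s : Int) (target : String) :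
    target ∈ words ↔ ∃ q ∈ PySem.List.enumerate words s, q.2 = target := by
  induction words generalizing s with
  | nil => simp [PySem.List.enumerate_nil]
  | cons w t ih =>
    simp only [List.mem_cons, PySem.List.enumerate_cons]
    constructor
    · rintro (h | h)
      · exact ⟨(s, w), Or.inl rfl, h.symm⟩
      · obtain ⟨q, hq, hqt⟩ := (ih (s + 1)).mp h
        exact ⟨q, Or.inr hq, hqt⟩
    · rintro ⟨q, hq, hqt⟩
      rcases hq with h | h
      · left; rw [← hqt, h]
      · right; exact (ih (s + 1)).mpr ⟨q, h, hqt⟩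

theorem mem_iff_exists (words : List String) (target : String) :
    target ∈ words ↔ ∃ q ∈ PySem.List.enumerate words 0, q.2 = target :=
  mem_iff_exists_gen words 0 target

theorem contains_eq (words : List String) (target : String) :
    ((PySem.List.enumerate words 0).foldl
        (fun d p => d.modify p.2 [] (· ++ [p.1]))
        (PySem.Dict.empty : PySem.Dict String (List Int))).contains target
      = decide (target ∈ words) := by
  rw [PySem.Dict.contains_eq_decide_mem_keys]
  rw [PySem.Dict.keys_foldl_modify_key (l := PySem.List.enumerate words 0)
      (key := fun p => p.2) (d0 := []) (f := fun d p => (· ++ [p.1]))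
      (d := PySem.Dict.empty)]
  simp [PySem.List.map_snd_enumerate, PySem.Dict.keys_empty]

theorem filter_isEmpty (words : List String) (target : String) :
    ((PySem.List.enumerate words 0).filter (fun p => p.2 == target)).isEmpty
      = !decide (target ∈ words) := by
  by_cases hm : target ∈ words
  · obtain ⟨q, hq, hqt⟩ := (mem_iff_exists words target).mp hm
    have : q ∈ (PySem.List.enumerate words 0).filter (fun p => p.2 == target) :=
      List.mem_filter.mpr ⟨hq, by simp [hqt]⟩
    simp only [hm, decide_true, Bool.not_true]
    exact List.isEmpty_eq_false_iff.mpr (List.ne_nil_of_mem this)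
  · simp only [hm, decide_false, Bool.not_false, List.isEmpty_iff, List.filter_eq_nil_iff]
    intro q hq
    simp only [beq_iff_eq]
    exact fun h => hm ((mem_iff_exists words target).mpr ⟨q, hq, h⟩)

-- ===== VERDICT (by name: the statement is the Claim_ definition above) =====
theorem closestTarget_spec : Claim_equal_closestTarget := by
  intro words target startIndex _
  unfold Spec_closestTarget closestTarget closestTarget_alt
  simp only []
  rw [PySem.List.foldl_if_eq_foldl_filter (p := fun q : Int × String => q.2 == target)
      (f := fun s q => (true,
        min (min s.2 |startIndex - q.1|) (PySem.List.len words - |startIndex - q.1|)))]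
  have hB := pair_fold
      ((PySem.List.enumerate words 0).filter (fun q => q.2 == target))
      (fun a q => min (min a |startIndex - q.1|) (PySem.List.len words - |startIndex - q.1|))
      false (PySem.List.len words)
  simp only at hB
  rw [hB]
  rw [contains_eq, positions_eq, List.foldl_map, filter_isEmpty]
  by_cases hm : target ∈ words <;> simp [hm]
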